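-- pv_equiv track=rewrite | github.com/plecmaciej/Leetcode-solutions | 3754-concatenate-non-zero-digits-and-multiply-by-sum-i/3754-concatenate-non-zero-digits-and-multiply-by-sum-i.py | sumAndMultiply
-- ===== SOURCE A (Python) =====
-- def sumAndMultiply(n: int) -> int:
--     counter = 0
--     sume = 0
--     x = 0
--     while n > 0:
--         if n % 10 is not 0:
--             x = pow(10, counter) * (n % 10) + x
--             sume += n % 10
--             counter += 1
--         n = n // 10
--
--     return x * sume
-- ===== SOURCE B (Python) =====
-- def sumAndMultiply(n: int) -> int:
--     ds = []
--     while n > 0: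
--         d = n % 10
--         if d:
--             ds.append(d)
--         n //= 10
--     ds.reverse()
--     x = 0
--     for d in ds:
--         x = 10 * x + d
--     return x * sum(ds)
-- ===== Notes on version B (the rewrite author's own statement) =====
-- stated objective: alternative
-- what changed: B collects the nonzero digits into a list, reverses it and builds the concatenation MSB-first by Horner's rule (x = 10*x + d), instead of A's one-pass LSB accumulation with a running counter and pow(10, counter) recomputed at every digit.
import Mathlib
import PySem

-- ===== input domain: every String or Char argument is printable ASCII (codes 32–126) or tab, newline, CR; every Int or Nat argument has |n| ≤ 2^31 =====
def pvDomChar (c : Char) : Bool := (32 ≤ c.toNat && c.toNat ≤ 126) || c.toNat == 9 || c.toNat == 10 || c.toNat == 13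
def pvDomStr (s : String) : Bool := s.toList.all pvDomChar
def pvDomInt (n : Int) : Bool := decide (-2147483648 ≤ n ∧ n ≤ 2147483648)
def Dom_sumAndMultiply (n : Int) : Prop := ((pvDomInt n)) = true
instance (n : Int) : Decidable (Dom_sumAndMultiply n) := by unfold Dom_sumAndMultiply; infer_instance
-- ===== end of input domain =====

-- B replaces A's LSB-first accumulation with pow(10,counter) by collect-reverse-Horner; alternative structure, return value identical.

-- ===== PORT A =====
-- A's while loop, state (n, counter, sume, x); after the loop, x * sume.
-- counter only ever holds 0,1,2,…, so pow(10, counter) is ported as 10 ^ counter.toNat.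
def sumAndMultiplyGo (n counter sume x : Int) : Int :=
  if _h : 0 < n then
    if PySem.Int.mod n 10 ≠ 0 then
      sumAndMultiplyGo (PySem.Int.floordiv n 10) (counter + 1)
        (sume + PySem.Int.mod n 10) (10 ^ counter.toNat * PySem.Int.mod n 10 + x)
    else
      sumAndMultiplyGo (PySem.Int.floordiv n 10) counter sume x
  else x * sume
termination_by n.toNat
decreasing_by
  all_goals
    rw [PySem.Int.floordiv_eq_ediv_of_pos (by omega : (0:Int) < 10)]
    have h1 : n / 10 < n := Int.ediv_lt_of_lt_mul (by omega) (by omega)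
    have h2 : 0 ≤ n / 10 := Int.ediv_nonneg (by omega) (by omega)
    omega

def sumAndMultiply (n : Int) : Int := sumAndMultiplyGo n 0 0 0

-- ===== PORT B =====
-- B's first while loop: append each nonzero digit (least significant first) to ds.
def collectGo (n : Int) (ds : List Int) : List Int :=
  if _h : 0 < n then
    collectGo (PySem.Int.floordiv n 10)
      (if PySem.Int.mod n 10 ≠ 0 then ds ++ [PySem.Int.mod n 10] else ds)
  else ds
termination_by n.toNat
decreasing_by
  rw [PySem.Int.floordiv_eq_ediv_of_pos (by omega : (0:Int) < 10)]
  have h1 : n / 10 < n := Int.ediv_lt_of_lt_mul (by omega) (by omega)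
  have h2 : 0 ≤ n / 10 := Int.ediv_nonneg (by omega) (by omega)
  omega

-- ds.reverse(), then Horner's rule x = 10*x + d over ds, then x * sum(ds)
def sumAndMultiply_alt (n : Int) : Int :=
  let ds := (collectGo n []).reverse
  let x := ds.foldl (fun x d => 10 * x + d) 0
  x * ds.sum

-- ===== PRECONDITION & SPEC =====
def Spec_sumAndMultiply (n : Int) (out : Int) : Prop := out = sumAndMultiply_alt n
instance (n : Int) (out : Int) : Decidable (Spec_sumAndMultiply n out) := by unfold Spec_sumAndMultiply; infer_instance

-- ===== CLAIM (what is proved, stated in full; the proofs are below) =====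
def Claim_equal_sumAndMultiply : Prop := ∀ (n : Int), Dom_sumAndMultiply n → Spec_sumAndMultiply n (sumAndMultiply n)

-- ===== LEMMAS AND PROOFS =====

-- value of a digit list read least-significant-digit first
def lsbVal : List Int → Int
  | [] => 0
  | d :: t => d + 10 * lsbVal t

theorem collectGo_pos (n : Int) (ds : List Int) (h : 0 < n) :
    collectGo n ds = collectGo (PySem.Int.floordiv n 10)
      (if PySem.Int.mod n 10 ≠ 0 then ds ++ [PySem.Int.mod n 10] else ds) := by
  rw [collectGo, dif_pos h]

theorem collectGo_nonpos (n : Int) (ds : List Int) (h : ¬ 0 < n) : collectGo n ds = ds := by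
  rw [collectGo, dif_neg h]

theorem goA_pos (n c s x : Int) (h : 0 < n) :
    sumAndMultiplyGo n c s x =
      if PySem.Int.mod n 10 ≠ 0 then
        sumAndMultiplyGo (PySem.Int.floordiv n 10) (c + 1)
          (s + PySem.Int.mod n 10) (10 ^ c.toNat * PySem.Int.mod n 10 + x)
      else
        sumAndMultiplyGo (PySem.Int.floordiv n 10) c s x := by
  rw [sumAndMultiplyGo, dif_pos h]

theorem goA_nonpos (n c s x : Int) (h : ¬ 0 < n) : sumAndMultiplyGo n c s x = x * s := by
  rw [sumAndMultiplyGo, dif_neg h]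

theorem collectGo_acc_aux (k : Nat) :
    ∀ n : Int, n.toNat ≤ k → ∀ ds, collectGo n ds = ds ++ collectGo n [] := by
  induction k with
  | zero =>
    intro n hn ds
    rw [collectGo_nonpos n ds (by omega), collectGo_nonpos n [] (by omega)]
    simp
  | succ k ih =>
    intro n hn ds
    by_cases h : 0 < n
    · have h1 : n / 10 < n := Int.ediv_lt_of_lt_mul (by omega) (by omega)
      have h2 : 0 ≤ n / 10 := Int.ediv_nonneg (by omega) (by omega)
      have hfd : PySem.Int.floordiv n 10 = n / 10 :=
        PySem.Int.floordiv_eq_ediv_of_pos (by omega)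
      have hb : (n / 10).toNat ≤ k := by omega
      rw [collectGo_pos n ds h, collectGo_pos n [] h, hfd]
      by_cases hd : PySem.Int.mod n 10 ≠ 0
      · rw [if_pos hd, if_pos hd, ih (n / 10) hb,
          ih (n / 10) hb ([] ++ [PySem.Int.mod n 10])]
        simp
      · rw [if_neg hd, if_neg hd, ih (n / 10) hb]
    · rw [collectGo_nonpos n ds h, collectGo_nonpos n [] h]; simp

theorem collectGo_acc (n : Int) (ds : List Int) : collectGo n ds = ds ++ collectGo n [] :=
  collectGo_acc_aux n.toNat n le_rfl ds

theorem goA_eq_aux (k : Nat) :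
    ∀ n : Int, n.toNat ≤ k → ∀ c s x : Int, 0 ≤ c →
      sumAndMultiplyGo n c s x
        = (x + 10 ^ c.toNat * lsbVal (collectGo n [])) * (s + (collectGo n []).sum) := by
  induction k with
  | zero =>
    intro n hn c s x _
    rw [goA_nonpos n c s x (by omega), collectGo_nonpos n [] (by omega)]
    simp [lsbVal]
  | succ k ih =>
    intro n hn c s x hc
    by_cases h : 0 < n
    · have h1 : n / 10 < n := Int.ediv_lt_of_lt_mul (by omega) (by omega)
      have h2 : 0 ≤ n / 10 := Int.ediv_nonneg (by omega) (by omega)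
      have hfd : PySem.Int.floordiv n 10 = n / 10 :=
        PySem.Int.floordiv_eq_ediv_of_pos (by omega)
      have hb : (n / 10).toNat ≤ k := by omega
      rw [goA_pos n c s x h, collectGo_pos n [] h, hfd]
      by_cases hd : PySem.Int.mod n 10 ≠ 0
      · rw [if_pos hd, if_pos hd, ih (n / 10) hb _ _ _ (by omega),
          List.nil_append, collectGo_acc (n / 10) [PySem.Int.mod n 10]]
        have hcs : (c + 1).toNat = c.toNat + 1 := by omega
        simp only [lsbVal, List.singleton_append, List.sum_cons, hcs, pow_succ]
        ring
      · rw [if_neg hd, if_neg hd, ih (n / 10) hb _ _ _ hc]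
    · rw [goA_nonpos n c s x h, collectGo_nonpos n [] h]
      simp [lsbVal]

theorem foldl_reverse_horner (l : List Int) :
    ∀ x0 : Int, l.reverse.foldl (fun x d => 10 * x + d) x0 = x0 * 10 ^ l.length + lsbVal l := by
  induction l with
  | nil => intro x0; simp [lsbVal]
  | cons d t ih =>
    intro x0
    simp only [List.reverse_cons, List.foldl_append, List.foldl_cons, List.foldl_nil, ih,
      lsbVal, List.length_cons]
    ring

-- ===== VERDICT (by name: the statement is the Claim_ definition above) =====
theorem sumAndMultiply_spec : Claim_equal_sumAndMultiply := by
  intro n _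
  show sumAndMultiplyGo n 0 0 0 =
    ((collectGo n []).reverse.foldl (fun x d => 10 * x + d) 0) * (collectGo n []).reverse.sum
  rw [goA_eq_aux n.toNat n le_rfl 0 0 0 le_rfl, foldl_reverse_horner, List.sum_reverse]
  simp
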